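-- pv_equiv track=rewrite | github.com/LakshminathGuddanti/APSSDC_DjangoInternshipTasks | Tasks/day11.py | oddlist
-- ===== SOURCE A (Python) =====
-- def oddlist(n):
-- 	lst=[]
-- 	t=0
-- 	while(n>0):
-- 		t=n%10
-- 		if t%2 == 1:
-- 			lst.append(t)
-- 		n=n//10
-- 	return lst[::-1]
-- ===== SOURCE B (Python) =====
-- def oddlist(n):
--     if n <= 0:
--         return []
--     return [int(c) for c in str(n) if c in "13579"]
-- ===== Notes on version B (the rewrite author's own statement) =====
-- stated objective: idiomatic
-- what changed: B scans the decimal string of n with a comprehension (most-significant digit first), replacing A's repeated mod/floordiv extraction, list append and trailing [::-1] reversal.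
import Mathlib
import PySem

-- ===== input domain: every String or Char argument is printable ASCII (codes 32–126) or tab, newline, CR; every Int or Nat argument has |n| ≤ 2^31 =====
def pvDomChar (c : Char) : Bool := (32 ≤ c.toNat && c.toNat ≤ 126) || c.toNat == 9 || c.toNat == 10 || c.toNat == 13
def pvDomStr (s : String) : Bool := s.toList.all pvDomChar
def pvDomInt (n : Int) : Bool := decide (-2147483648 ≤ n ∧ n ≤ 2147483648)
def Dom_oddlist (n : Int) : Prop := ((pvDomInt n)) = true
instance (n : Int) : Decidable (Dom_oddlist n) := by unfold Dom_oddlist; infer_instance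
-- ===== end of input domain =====

-- B collects the odd digits by scanning str(n) left to right (idiomatic comprehension),
-- instead of A's mod/floordiv extraction with a trailing [::-1] reversal.

-- ===== PORT A =====
-- the while loop: state is (n, lst); each step reads t = n % 10, conditionally appends, sets n = n // 10
def oddlistLoop (n : Int) (lst : List Int) : List Int :=
  if h : n > 0 then
    let t := PySem.Int.mod n 10
    oddlistLoop (PySem.Int.floordiv n 10)
      (if PySem.Int.mod t 2 = 1 then lst ++ [t] else lst)
  else lst
termination_by n.toNat
decreasing_by
  rw [PySem.Int.floordiv_eq_ediv_of_pos (by norm_num)]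
  omega

def oddlist (n : Int) : List Int := (oddlistLoop n []).reverse
  -- lst[::-1] with step -1 over the full list is exactly List.reverse

-- ===== PORT B =====
def oddlist_alt (n : Int) : List Int :=
  if n ≤ 0 then []
  else
    -- str(n) → PySem.Int.toChars (toList_toStr); 'c in "13579"' → membership in its char list;
    -- int(c) on a decimal digit character is exactly its code minus 48
    ((PySem.Int.toChars n).filter (fun c => ("13579".toList).contains c)).map
      (fun c => ((c.toNat : Int) - 48))

-- ===== PRECONDITION & SPEC =====
def Spec_oddlist (n : Int) (out : List Int) : Prop := out = oddlist_alt n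
instance (n : Int) (out : List Int) : Decidable (Spec_oddlist n out) := by unfold Spec_oddlist; infer_instance

-- ===== CLAIM (what is proved, stated in full; the proofs are below) =====
def Claim_equal_oddlist : Prop := ∀ (n : Int), Dom_oddlist n → Spec_oddlist n (oddlist n)

-- ===== LEMMAS AND PROOFS =====

theorem oddlistLoop_append (n : Int) (lst : List Int) :
    oddlistLoop n lst = lst ++ oddlistLoop n [] := by
  by_cases h : n > 0
  · have hl : oddlistLoop n lst
        = oddlistLoop (PySem.Int.floordiv n 10)
            (if PySem.Int.mod (PySem.Int.mod n 10) 2 = 1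
             then lst ++ [PySem.Int.mod n 10] else lst) := by
      rw [oddlistLoop]; simp [h]
    have hr : oddlistLoop n []
        = oddlistLoop (PySem.Int.floordiv n 10)
            (if PySem.Int.mod (PySem.Int.mod n 10) 2 = 1
             then [PySem.Int.mod n 10] else []) := by
      rw [oddlistLoop]; simp [h]
    rw [hl, hr]
    split_ifs with hc
    · rw [oddlistLoop_append (PySem.Int.floordiv n 10) (lst ++ [PySem.Int.mod n 10]),
        oddlistLoop_append (PySem.Int.floordiv n 10) [PySem.Int.mod n 10]]
      simp
    · exact oddlistLoop_append (PySem.Int.floordiv n 10) lst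
  · have hl : oddlistLoop n lst = lst := by rw [oddlistLoop]; simp [h]
    have hr : oddlistLoop n [] = [] := by rw [oddlistLoop]; simp [h]
    rw [hl, hr, List.append_nil]
termination_by n.toNat
decreasing_by
  all_goals
    rw [PySem.Int.floordiv_eq_ediv_of_pos (by norm_num)]
    omega

-- facts about one decimal digit's character, by case analysis on d < 10
theorem digit_contains (d : Nat) (hd : d < 10) :
    ("13579".toList).contains (Nat.digitChar d) = (decide (d % 2 = 1)) := by
  interval_cases d <;> decide

theorem digit_val (d : Nat) (hd : d < 10) :
    ((Nat.digitChar d).toNat : Int) - 48 = (d : Int) := by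
  interval_cases d <;> decide

-- the filtered-mapped digit string of m equals the reversed loop result, for positive m
theorem main_lemma (m : Nat) (hm : 0 < m) :
    ((Nat.toDigits 10 m).filter (fun c => ("13579".toList).contains c)).map
      (fun c => ((c.toNat : Int) - 48))
    = (oddlistLoop (m : Int) []).reverse := by
  have hpos : (m : Int) > 0 := by exact_mod_cast hm
  have hd10 : m % 10 < 10 := Nat.mod_lt _ (by norm_num)
  rw [oddlistLoop]
  simp only [hpos, dif_pos]
  have hmod : PySem.Int.mod (m : Int) 10 = ((m % 10 : Nat) : Int) :=
    PySem.Int.mod_natCast m 10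
  have hdiv : PySem.Int.floordiv (m : Int) 10 = ((m / 10 : Nat) : Int) :=
    PySem.Int.floordiv_natCast m 10
  have hmod2 : PySem.Int.mod ((m % 10 : Nat) : Int) 2 = ((m % 10 % 2 : Nat) : Int) := by
    exact_mod_cast PySem.Int.mod_natCast (m % 10) 2
  rw [hmod, hdiv, hmod2]
  by_cases hsmall : m < 10
  · -- single digit: toDigits = [digitChar m], the recursive call is at 0 and returns its accumulator
    have hm10 : m % 10 = m := Nat.mod_eq_of_lt hsmall
    have hdv : m / 10 = 0 := Nat.div_eq_of_lt hsmall
    rw [hm10, hdv, Nat.toDigits_of_lt_base hsmall, List.filter_singleton,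
      digit_contains m hsmall]
    rw [oddlistLoop]
    simp only [show ¬((0 : Nat) : Int) > 0 by decide, dif_neg, not_false_iff]
    by_cases hodd : m % 2 = 1
    · have hc : ((m % 2 : Nat) : Int) = 1 := by rw [hodd]; rfl
      rw [if_pos hc]
      simp [hodd, digit_val m hsmall]
    · have hc : ¬((m % 2 : Nat) : Int) = 1 := by exact_mod_cast hodd
      rw [if_neg hc]
      simp [hodd]
  · -- m ≥ 10: peel the last digit on both sides and use the induction hypothesis on m / 10
    have hge : 10 ≤ m := le_of_not_gt hsmall
    have hq : 0 < m / 10 := Nat.div_pos hge (by norm_num)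
    rw [Nat.toDigits_of_base_le (by norm_num) hge, List.filter_append, List.map_append,
      main_lemma (m / 10) hq, List.filter_singleton, digit_contains _ hd10]
    by_cases hodd : m % 10 % 2 = 1
    · have hc : ((m % 10 % 2 : Nat) : Int) = 1 := by rw [hodd]; rfl
      rw [if_pos hc,
        oddlistLoop_append ((m / 10 : Nat) : Int) ([] ++ [((m % 10 : Nat) : Int)])]
      simp [hodd, digit_val _ hd10]
    · have hc : ¬((m % 10 % 2 : Nat) : Int) = 1 := by exact_mod_cast hodd
      rw [if_neg hc]
      simp [show ¬m % 2 = 1 by omega]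
termination_by m
decreasing_by exact Nat.div_lt_self hm (by norm_num)

-- ===== VERDICT (by name: the statement is the Claim_ definition above) =====
theorem oddlist_spec : Claim_equal_oddlist := by
  intro n _
  unfold Spec_oddlist oddlist oddlist_alt
  by_cases h : n ≤ 0
  · rw [oddlistLoop]
    simp [h]
  · have hpos : 0 < n := by omega
    simp only [h, if_neg, not_false_iff]
    have hn : n = ((n.toNat : Nat) : Int) := by omega
    have hmpos : 0 < n.toNat := by omega
    unfold PySem.Int.toChars
    simp only [show ¬ n < 0 by omega, if_neg, not_false_iff]
    have hmain := main_lemma n.toNat hmpos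
    rw [← hn] at hmain
    exact hmain.symm
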